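-- pv_equiv track=rewrite | github.com/fruit-in/leetcode | Problemset/1995-Count Special Quadruplets/Solution.py | countQuadruplets
-- ===== SOURCE A (Python) =====
-- from typing import List
--
-- def countQuadruplets(nums: List[int]) -> int:
--     n = len(nums)
--     ret = 0
--
--     for a in range(n):
--         for b in range(a + 1, n):
--             for c in range(b + 1, n):
--                 for d in range(c + 1, n):
--                     if nums[a] + nums[b] + nums[c] == nums[d]:
--                         ret += 1
--
--     return ret
-- ===== SOURCE B (Python) =====
-- def countQuadruplets(nums):
--     n = len(nums)
--     diff = {}
--     ret = 0
--     for b in range(n - 3, 0, -1):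
--         c = b + 1
--         for d in range(c + 1, n):
--             key = nums[d] - nums[c]
--             diff[key] = diff.get(key, 0) + 1
--         for a in range(b):
--             ret += diff.get(nums[a] + nums[b], 0)
--     return ret
-- ===== Notes on version B (the rewrite author's own statement) =====
-- stated objective: faster
-- what changed: Replaces the O(n^4) quadruple nested loop with an O(n^2) split at the b|c boundary: iterating b downward, a hashmap incrementally counts pair differences nums[d]-nums[c] for c>b and is queried with the pair sums nums[a]+nums[b] for a<b.
import Mathlib
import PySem

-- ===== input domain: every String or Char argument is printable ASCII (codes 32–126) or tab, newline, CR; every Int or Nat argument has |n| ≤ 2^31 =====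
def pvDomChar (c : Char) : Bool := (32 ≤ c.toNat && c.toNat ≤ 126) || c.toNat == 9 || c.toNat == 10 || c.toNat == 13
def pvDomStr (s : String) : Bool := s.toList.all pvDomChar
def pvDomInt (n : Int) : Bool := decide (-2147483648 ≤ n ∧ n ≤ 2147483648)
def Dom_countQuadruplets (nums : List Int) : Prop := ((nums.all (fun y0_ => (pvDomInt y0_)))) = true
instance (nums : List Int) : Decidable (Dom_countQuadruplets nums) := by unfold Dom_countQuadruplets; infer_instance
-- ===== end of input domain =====

-- B replaces A's O(n^4) quadruple loop by an O(n^2) split at the a|b / c|d boundary: a hashmap counts the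
-- pair differences nums[d]-nums[c] to the right and is matched against pair sums nums[a]+nums[b] to the left.

-- ===== PORT A =====
def countQuadruplets (nums : List Int) : Int :=
  let n : Int := nums.length
  (PySem.List.pyRange 0 n).foldl (fun ret a =>
    (PySem.List.pyRange (a+1) n).foldl (fun ret b =>
      (PySem.List.pyRange (b+1) n).foldl (fun ret c =>
        (PySem.List.pyRange (c+1) n).foldl (fun ret d =>
          if PySem.List.pyGetD nums a 0 + PySem.List.pyGetD nums b 0 + PySem.List.pyGetD nums c 0 == PySem.List.pyGetD nums d 0 then ret + 1 else ret)
        ret) ret) ret) 0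

-- ===== PORT B =====
def countQuadruplets_alt (nums : List Int) : Int :=
  let n : Int := nums.length
  let st := (PySem.List.pyRange (n-3) 0 (-1)).foldl (fun (st : PySem.Dict Int Int × Int) b =>
      let c := b + 1
      let diff := (PySem.List.pyRange (c+1) n).foldl (fun (d : PySem.Dict Int Int) i =>
          let key := PySem.List.pyGetD nums i 0 - PySem.List.pyGetD nums c 0
          d.insert key (d.getD key 0 + 1)) st.1
      let ret := (PySem.List.pyRange 0 b).foldl (fun r a =>
          r + diff.getD (PySem.List.pyGetD nums a 0 + PySem.List.pyGetD nums b 0) 0) st.2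
      (diff, ret)) (PySem.Dict.empty, 0)
  st.2

-- ===== PRECONDITION & SPEC =====
def Spec_countQuadruplets (nums : List Int) (out : Int) : Prop := out = countQuadruplets_alt nums
instance (nums : List Int) (out : Int) : Decidable (Spec_countQuadruplets nums out) := by unfold Spec_countQuadruplets; infer_instance

-- ===== CLAIM (what is proved, stated in full; the proofs are below) =====
def Claim_equal_countQuadruplets : Prop := ∀ (nums : List Int), Dom_countQuadruplets nums → Spec_countQuadruplets nums (countQuadruplets nums)

-- ===== LEMMAS AND PROOFS =====

-- x i = nums[i]
def pvX (nums : List Int) (i : Int) : Int := PySem.List.pyGetD nums i 0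

-- number of pairs lo ≤ c < d < n with nums[d] - nums[c] = k
def pvP (nums : List Int) (lo k : Int) : Int :=
  ((PySem.List.pyRange lo nums.length).map (fun c =>
    (((PySem.List.pyRange (c+1) nums.length).countP (fun d => pvX nums d - pvX nums c == k) : Nat) : Int))).sum

-- the per-b inner total Σ_{a<b} pvP (b+1) (x a + x b)
def pvG (nums : List Int) (b : Int) : Int :=
  ((PySem.List.pyRange 0 b).map (fun a => pvP nums (b+1) (pvX nums a + pvX nums b))).sum

lemma pvPredEq (x y z w : Int) : (x + y + z == w) = (w - z == x + y) := by
  rw [Bool.eq_iff_iff]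
  simp only [beq_iff_eq]
  constructor <;> intro <;> omega

-- A as a double sum over the split point
lemma pvA_eq (nums : List Int) :
    countQuadruplets nums =
      ((PySem.List.pyRange 0 nums.length).map (fun a =>
        ((PySem.List.pyRange (a+1) nums.length).map (fun b =>
          pvP nums (b+1) (pvX nums a + pvX nums b))).sum)).sum := by
  unfold countQuadruplets pvP pvX
  simp only [PySem.List.foldl_count_if, PySem.List.foldl_add, zero_add, pvPredEq]

-- swap the order of a triangular double sum
lemma pvSwap (f : Int → Int → Int) (n : Nat) :
    ((PySem.List.pyRange 0 (n : Int)).map (fun a =>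
      ((PySem.List.pyRange (a+1) (n : Int)).map (fun b => f a b)).sum)).sum
    = ((PySem.List.pyRange 0 (n : Int)).map (fun b =>
      ((PySem.List.pyRange 0 b).map (fun a => f a b)).sum)).sum := by
  induction n with
  | zero => simp [PySem.List.pyRange_one_eq_nil]
  | succ n ih =>
    have hcast : ((n + 1 : Nat) : Int) = (n : Int) + 1 := by push_cast; ring
    rw [hcast]
    rw [PySem.List.pyRange_one_succ_right (by positivity)]
    rw [List.map_append, List.sum_append, List.map_append, List.sum_append]
    have hinner : ∀ a ∈ PySem.List.pyRange 0 (n : Int),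
        ((PySem.List.pyRange (a+1) ((n : Int)+1)).map (fun b => f a b)).sum
        = ((PySem.List.pyRange (a+1) (n : Int)).map (fun b => f a b)).sum + f a n := by
      intro a ha
      rw [PySem.List.mem_pyRange_one] at ha
      rw [PySem.List.pyRange_one_succ_right (by omega)]
      simp
    rw [List.map_congr_left hinner]
    rw [PySem.List.sum_map_add_int]
    rw [ih]
    simp [PySem.List.pyRange_one_eq_nil]

-- no pairs start at or beyond n-1
lemma pvP_zero (nums : List Int) (lo k : Int) (h : (nums.length : Int) - 1 ≤ lo) :
    pvP nums lo k = 0 := by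
  unfold pvP
  apply List.sum_eq_zero
  intro x hx
  rw [List.mem_map] at hx
  obtain ⟨c, hc, rfl⟩ := hx
  rw [PySem.List.mem_pyRange_one] at hc
  rw [PySem.List.pyRange_one_eq_nil (by omega)]
  simp

-- peel off the pairs whose c is exactly lo
lemma pvP_cons (nums : List Int) (lo k : Int) :
    pvP nums lo k =
      (((PySem.List.pyRange (lo+1) nums.length).countP
        (fun d => pvX nums d - pvX nums lo == k) : Nat) : Int) + pvP nums (lo+1) k := by
  by_cases hlo : lo < (nums.length : Int)
  · unfold pvP
    rw [PySem.List.pyRange_one_cons hlo]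
    simp
  · rw [pvP_zero nums lo k (by omega), pvP_zero nums (lo+1) k (by omega)]
    rw [PySem.List.pyRange_one_eq_nil (by omega)]
    simp

-- the dict built by the inner d-loop counts pair differences
lemma pvDiff_getD (nums : List Int) (c : Int) (D : PySem.Dict Int Int) (k : Int) :
    (List.foldl (fun (d : PySem.Dict Int Int) i =>
        d.insert (PySem.List.pyGetD nums i 0 - PySem.List.pyGetD nums c 0)
          (d.getD (PySem.List.pyGetD nums i 0 - PySem.List.pyGetD nums c 0) 0 + 1))
      D (PySem.List.pyRange (c+1) (nums.length : Int))).getD k 0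
    = D.getD k 0 +
      (((PySem.List.pyRange (c+1) nums.length).countP (fun d => pvX nums d - pvX nums c == k) : Nat) : Int) := by
  have hmap : (List.foldl (fun (d : PySem.Dict Int Int) i =>
        d.insert (PySem.List.pyGetD nums i 0 - PySem.List.pyGetD nums c 0)
          (d.getD (PySem.List.pyGetD nums i 0 - PySem.List.pyGetD nums c 0) 0 + 1))
      D (PySem.List.pyRange (c+1) (nums.length : Int)))
      = (((PySem.List.pyRange (c+1) (nums.length : Int)).map
          (fun i => PySem.List.pyGetD nums i 0 - PySem.List.pyGetD nums c 0)).foldl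
            (fun (d : PySem.Dict Int Int) key => d.insert key (d.getD key 0 + 1)) D) := by
    rw [List.foldl_map]
  rw [hmap, PySem.Dict.getD_foldl_insert_add_one]
  congr 1
  rw [List.count_eq_countP, List.countP_map]
  rfl

-- main loop invariant of B: folding b = m, m-1, ..., 1 adds the per-b totals to ret,
-- provided the dict already counts the pairs with c >= m+2
lemma pvBloop (nums : List Int) (m : Nat) :
    ∀ (D : PySem.Dict Int Int) (r : Int),
    (∀ k, D.getD k 0 = pvP nums ((m : Int)+2) k) →
    (List.foldl
      (fun (st : PySem.Dict Int Int × Int) b =>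
        (List.foldl (fun (d : PySem.Dict Int Int) i =>
            d.insert (PySem.List.pyGetD nums i 0 - PySem.List.pyGetD nums (b+1) 0)
              (d.getD (PySem.List.pyGetD nums i 0 - PySem.List.pyGetD nums (b+1) 0) 0 + 1))
          st.1 (PySem.List.pyRange (b+1+1) (nums.length : Int)),
         List.foldl (fun r a =>
            r + (List.foldl (fun (d : PySem.Dict Int Int) i =>
                  d.insert (PySem.List.pyGetD nums i 0 - PySem.List.pyGetD nums (b+1) 0)
                    (d.getD (PySem.List.pyGetD nums i 0 - PySem.List.pyGetD nums (b+1) 0) 0 + 1))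
                st.1 (PySem.List.pyRange (b+1+1) (nums.length : Int))).getD
              (PySem.List.pyGetD nums a 0 + PySem.List.pyGetD nums b 0) 0)
          st.2 (PySem.List.pyRange 0 b)))
      (D, r) (PySem.List.pyRange (m : Int) 0 (-1))).2
    = r + ((PySem.List.pyRange 1 ((m : Int)+1)).map (fun b => pvG nums b)).sum := by
  induction m with
  | zero =>
    intro D r _
    simp only [Nat.cast_zero]
    rw [PySem.List.pyRange_neg_one_eq_nil le_rfl]
    rw [show PySem.List.pyRange 1 ((0:Int)+1) = [] from PySem.List.pyRange_one_eq_nil (by omega)]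
    simp
  | succ m ih =>
    intro D r hD
    push_cast at hD
    have hcast : ((m + 1 : Nat) : Int) = (m : Int) + 1 := by push_cast; ring
    rw [hcast]
    rw [PySem.List.pyRange_neg_one_cons (by positivity), List.foldl_cons]
    simp only []
    simp only [show (m : Int) + 1 - 1 = (m : Int) from by ring]
    have hdiff : ∀ k,
        (List.foldl (fun (d : PySem.Dict Int Int) i =>
            d.insert (PySem.List.pyGetD nums i 0 - PySem.List.pyGetD nums ((m : Int)+1+1) 0)
              (d.getD (PySem.List.pyGetD nums i 0 - PySem.List.pyGetD nums ((m : Int)+1+1) 0) 0 + 1))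
          D (PySem.List.pyRange ((m : Int)+1+1+1) (nums.length : Int))).getD k 0
        = pvP nums ((m : Int)+2) k := by
      intro k
      rw [pvDiff_getD nums ((m : Int)+1+1) D k]
      rw [hD k]
      rw [pvP_cons nums ((m : Int)+2) k]
      simp only [show (m : Int)+1+1 = (m : Int)+2 from by ring,
                 show (m : Int)+2+1 = (m : Int)+3 from by ring,
                 show (m : Int)+1+2 = (m : Int)+3 from by ring]
      omega
    rw [ih _ _ hdiff]
    rw [PySem.List.foldl_add]
    have hret :
        ((PySem.List.pyRange 0 ((m : Int)+1)).map (fun a =>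
          (List.foldl (fun (d : PySem.Dict Int Int) i =>
              d.insert (PySem.List.pyGetD nums i 0 - PySem.List.pyGetD nums ((m : Int)+1+1) 0)
                (d.getD (PySem.List.pyGetD nums i 0 - PySem.List.pyGetD nums ((m : Int)+1+1) 0) 0 + 1))
            D (PySem.List.pyRange ((m : Int)+1+1+1) (nums.length : Int))).getD
              (PySem.List.pyGetD nums a 0 + PySem.List.pyGetD nums ((m : Int)+1) 0) 0)).sum
        = pvG nums ((m : Int)+1) := by
      unfold pvG
      apply congrArg
      apply List.map_congr_left
      intro a _
      rw [hdiff]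
      simp only [pvX, show (m : Int)+1+1 = (m : Int)+2 from by ring]
    rw [hret]
    rw [show PySem.List.pyRange 1 ((m : Int)+1+1)
          = PySem.List.pyRange 1 ((m : Int)+1) ++ [(m : Int)+1] from
        PySem.List.pyRange_one_succ_right (by omega)]
    rw [List.map_append, List.sum_append]
    simp only [List.map_cons, List.map_nil, List.sum_cons, List.sum_nil]
    omega

-- assembled B value
lemma pvB_eq (nums : List Int) :
    countQuadruplets_alt nums =
      ((PySem.List.pyRange 1 ((nums.length : Int) - 2)).map (fun b => pvG nums b)).sum := by
  by_cases h3 : 3 ≤ nums.length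
  · simp only [countQuadruplets_alt]
    have hm : (nums.length : Int) - 3 = ((nums.length - 3 : Nat) : Int) := by omega
    rw [hm]
    rw [pvBloop nums (nums.length - 3) PySem.Dict.empty 0 (by
      intro k
      rw [PySem.Dict.getD_empty]
      rw [pvP_zero nums _ k (by omega)])]
    rw [show ((nums.length - 3 : Nat) : Int) + 1 = (nums.length : Int) - 2 by omega]
    ring
  · simp only [countQuadruplets_alt]
    rw [show PySem.List.pyRange ((nums.length : Int) - 3) 0 (-1) = [] from
        PySem.List.pyRange_neg_one_eq_nil (by omega)]
    rw [show PySem.List.pyRange 1 ((nums.length : Int) - 2) = [] from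
        PySem.List.pyRange_one_eq_nil (by omega)]
    simp

-- terms of the swapped A-sum outside 1 ≤ b ≤ n-3 vanish
lemma pvG_zero_high (nums : List Int) (b : Int) (hb : (nums.length : Int) - 2 ≤ b) :
    pvG nums b = 0 := by
  unfold pvG
  apply List.sum_eq_zero
  intro x hx
  rw [List.mem_map] at hx
  obtain ⟨a, _, rfl⟩ := hx
  exact pvP_zero nums (b+1) _ (by omega)

lemma pvA_as_G (nums : List Int) :
    countQuadruplets nums =
      ((PySem.List.pyRange 0 (nums.length : Int)).map (fun b => pvG nums b)).sum := by
  rw [pvA_eq, pvSwap (fun a b => pvP nums (b+1) (pvX nums a + pvX nums b)) nums.length]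
  rfl

theorem pvMain (nums : List Int) : countQuadruplets nums = countQuadruplets_alt nums := by
  rw [pvA_as_G, pvB_eq]
  by_cases h3 : 3 ≤ nums.length
  · rw [PySem.List.pyRange_one_append 0 1 (nums.length : Int) (by omega) (by omega)]
    rw [PySem.List.pyRange_one_append 1 ((nums.length : Int) - 2) (nums.length : Int)
        (by omega) (by omega)]
    rw [List.map_append, List.sum_append, List.map_append, List.sum_append]
    have h0 : ((PySem.List.pyRange 0 1).map (fun b => pvG nums b)).sum = 0 := by
      rw [show PySem.List.pyRange 0 1 = [0] by decide]
      simp [pvG, PySem.List.pyRange_one_eq_nil]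
    have hhi : ((PySem.List.pyRange ((nums.length : Int) - 2) (nums.length : Int)).map
        (fun b => pvG nums b)).sum = 0 := by
      apply List.sum_eq_zero
      intro x hx
      rw [List.mem_map] at hx
      obtain ⟨b, hb, rfl⟩ := hx
      rw [PySem.List.mem_pyRange_one] at hb
      exact pvG_zero_high nums b (by omega)
    rw [h0, hhi]
    ring
  · rw [PySem.List.pyRange_one_eq_nil (show (nums.length : Int) - 2 ≤ 1 by omega)]
    have : ((PySem.List.pyRange 0 (nums.length : Int)).map (fun b => pvG nums b)).sum = 0 := by
      apply List.sum_eq_zero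
      intro x hx
      rw [List.mem_map] at hx
      obtain ⟨b, hb, rfl⟩ := hx
      rw [PySem.List.mem_pyRange_one] at hb
      exact pvG_zero_high nums b (by omega)
    rw [this]
    simp

-- ===== VERDICT (by name: the statement is the Claim_ definition above) =====
theorem countQuadruplets_spec : Claim_equal_countQuadruplets := by
  intro nums _
  unfold Spec_countQuadruplets
  exact pvMain nums
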